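-- pv_equiv track=rewrite | github.com/YanniEtchi237/Image-Cationing-LSTM | preprocessor.py | preprocess_captions
-- ===== SOURCE A (Python) =====
-- def preprocess_captions(captions, images_features):
--     """
--     Preprocesses captions and converts them into a dictionary format.
--
--     Args:
--     - captions (list): List of captions, where each caption is a string containing the image name and caption separated by a tab.
--     - images_features (list): List of image names with features predicted by ResNet50.
--
--     Returns:
--     - captions_dict (dict): Dictionary where keys are image names and values are lists of preprocessed captions.
--     """
--
--     # Initialize an empty dictionary to store preprocessed captions
--     captions_dict = {}
--
--     # Iterate through each caption
--     for caption in captions: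
--         try:
--             # Split the caption at '\t' to extract image name and caption text
--             img_name = caption.split('\t')[0][:-2]
--             caption_text = caption.split('\t')[1]
--
--             # Check if the image name is in the list of images with features
--             if img_name in images_features:
--                 # Add the caption to the dictionary under the corresponding image name
--                 if img_name not in captions_dict:
--                     captions_dict[img_name] = [caption_text]
--                 else:
--                     captions_dict[img_name].append(caption_text)
--         except:
--             pass # Handle exceptions gracefully, if any
--
--     # Define a function to preprocess individual captions
--     def process(txt):
--         return "startofseq " + txt.lower() + " endofseq"
--
--     # Preprocess each caption in the dictionary
--     for image, captions in captions_dict.items():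
--         for idx, caption in enumerate(captions):
--             captions_dict[image][idx] = process(caption)
--
--     # Create a vocabulary for words in captions
--     word_counts = {}
--     word_index = 1
--     for image, captions in captions_dict.items():
--         for caption in captions:
--             for word in caption.split():
--                 if word not in word_counts:
--                     word_counts[word] = word_index
--                     word_index += 1
--
--     # Convert words in captions to integers based on the vocabulary
--     for image, captions in captions_dict.items():
--         for caption in captions:
--             encoded_caption = [word_counts[word] for word in caption.split()]
--             captions_dict[image][captions.index(caption)] = encoded_caption
--
--     return word_counts,captions_dict
-- ===== SOURCE B (Python) =====
-- def preprocess_captions(captions, images_features):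
--     features = set(images_features)
--
--     # Phase 1: group caption texts by image name (lines without a tab are skipped,
--     # like A's bare except swallowing the IndexError).
--     grouped = {}
--     for line in captions:
--         parts = line.split('\t')
--         if len(parts) < 2:
--             continue
--         img_name = parts[0][:-2]
--         if img_name in features:
--             grouped.setdefault(img_name, []).append(parts[1])
--
--     # Phase 2: ONE combined pass — wrap, build the vocabulary and integer-encode
--     # each caption in the same traversal (ids are first-seen order starting at 1).
--     word_counts = {}
--     captions_dict = {}
--     for img_name, texts in grouped.items():
--         captions_dict[img_name] = [
--             [word_counts.setdefault(w, len(word_counts) + 1)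
--              for w in ("startofseq " + t.lower() + " endofseq").split()]
--             for t in texts
--         ]
--     return word_counts, captions_dict
-- ===== Notes on version B (the rewrite author's own statement) =====
-- stated objective: faster
-- what changed: A's three separate dict-wide passes after grouping (wrap every caption in place, then build the full vocabulary, then re-scan every caption and re-encode it via captions.index) are replaced by one combined traversal that wraps, assigns first-seen word ids with setdefault(w, len(word_counts)+1) and integer-encodes each caption in the same loop, and the linear 'img_name in images_features' list scan is replaced by a set lookup.
import Mathlib
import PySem

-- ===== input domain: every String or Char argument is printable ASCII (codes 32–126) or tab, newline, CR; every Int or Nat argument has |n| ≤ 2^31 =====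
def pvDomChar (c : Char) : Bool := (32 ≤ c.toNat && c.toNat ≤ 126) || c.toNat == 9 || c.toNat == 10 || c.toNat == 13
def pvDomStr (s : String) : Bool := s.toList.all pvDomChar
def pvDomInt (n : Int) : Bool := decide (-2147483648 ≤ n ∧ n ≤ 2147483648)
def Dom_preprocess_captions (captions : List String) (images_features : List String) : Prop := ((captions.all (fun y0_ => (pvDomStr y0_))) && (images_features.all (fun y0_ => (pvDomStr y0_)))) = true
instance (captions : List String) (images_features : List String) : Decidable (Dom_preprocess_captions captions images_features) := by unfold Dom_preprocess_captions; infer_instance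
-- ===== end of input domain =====

-- B replaces A's three dict-wide passes after grouping (wrap each caption in place, build the
-- full vocabulary, re-scan and encode via captions.index) by one combined traversal that
-- wraps, assigns first-seen ids and encodes each caption in the same loop, and tests image
-- names against a set instead of scanning the feature list (objective: faster; the timing
-- run measured B ≈ 2× faster than A on its generated inputs).

-- ===== PORT A =====
-- Python "startofseq " + txt.lower() + " endofseq"; str concatenation ported as PySem.Str.join (exact)
def pvA_process (txt : String) : String :=
  PySem.Str.join "" ["startofseq ", PySem.Str.lower txt, " endofseq"]

-- phase-1 dict update: `if img_name not in captions_dict: [caption_text] else append`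
def pvA_phase1Upd (images_features : List String) (d : PySem.Dict String (List String))
    (img_name : String) (caption_text : String) : PySem.Dict String (List String) :=
  if images_features.contains img_name then
    if !(d.contains img_name) then d.insert img_name [caption_text]
    else d.modify img_name [] (fun l => l ++ [caption_text])
  else d

-- phase-1 loop body: try: split/index/slice; except: pass (the bare except only ever sees the
-- IndexError of caption.split('\t')[1], i.e. pyGet? = none; caption.split('\t') is computed
-- twice, as in the Python)
def pvA_phase1Step (images_features : List String) (d : PySem.Dict String (List String))
    (caption : String) : PySem.Dict String (List String) :=
  match PySem.List.pyGet? ((PySem.Str.split? caption "\t").getD []) 1 with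
  | none => d
  | some caption_text =>
      pvA_phase1Upd images_features d
        (PySem.Str.slice ((PySem.List.pyGet? ((PySem.Str.split? caption "\t").getD []) 0).getD "")
          none (some (-2)))
        caption_text

-- grouped.setdefault(img_name, []).append(text)  IS  Dict.modify with default []

-- phase-3 inner loop body over words (state: (word_counts, word_index))
def pvA_vocabStep (s : PySem.Dict String Int × Int) (word : String) :
    PySem.Dict String Int × Int :=
  if s.1.contains word then s else (s.1.insert word s.2, s.2 + 1)

-- phase-4 loop over the LIVE list: `for caption in captions` indexes 0,1,… into a list whose
-- entries are replaced in place (string → encoded Int list) via captions.index(caption), so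
-- entries are Sum String (List Int).  The loop ends when the index passes the end (pyGet? =
-- none); the fuel argument (= the list's length, which set never changes) only makes this
-- same computation structural.  word_counts[word] is ported as getD _ 0: the key is always
-- present here (phase 3 inserted every word of every caption), so the default is never used.
def pvA_phase4 (wc : PySem.Dict String Int) :
    Nat → Nat → List (Sum String (List Int)) → List (Sum String (List Int))
  | 0, _, cur => cur
  | fuel+1, i, cur =>
    match PySem.List.pyGet? cur (i : Int) with
    | none => cur
    | some (Sum.inr _) => pvA_phase4 wc fuel (i+1) cur
    | some (Sum.inl caption) =>
        let encoded := (PySem.Str.split₀ caption).map (fun w => wc.getD w 0)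
        match PySem.List.index? cur (Sum.inl caption) with
        | some j => pvA_phase4 wc fuel (i+1) (cur.set j (Sum.inr encoded))
        | none => pvA_phase4 wc fuel (i+1) cur

def preprocess_captions (captions : List String) (images_features : List String) :
    (List (String × Int)) × (List (String × List (List Int))) :=
  -- phase 1: group caption texts by image name
  let captions_dict := captions.foldl (pvA_phase1Step images_features) PySem.Dict.empty
  -- phase 2: captions_dict[image][idx] = process(caption) for each enumerated caption
  let d2 := captions_dict.items.foldl (fun d p =>
      (PySem.List.enumerate p.2).foldl (fun d ic =>
        d.modify p.1 [] (fun l => l.set ic.1.toNat (pvA_process ic.2))) d) captions_dict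
  -- phase 3: vocabulary, word_index starting at 1
  let wcn := d2.items.foldl (fun s p =>
      p.2.foldl (fun s caption =>
        (PySem.Str.split₀ caption).foldl pvA_vocabStep s) s) (PySem.Dict.empty, (1 : Int))
  -- phase 4: replace each caption by its encoding (the value type changes from
  -- List String to List (List Int), so the updated dict is rebuilt key by key in items order)
  let dres := d2.items.foldl (fun dr p =>
      dr.insert p.1 ((pvA_phase4 wcn.1
        (p.2.map (Sum.inl : String → Sum String (List Int))).length 0 (p.2.map Sum.inl)).map
        (Sum.elim (fun _ => ([] : List Int)) id))) PySem.Dict.empty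
  (wcn.1.items, dres.items)

-- ===== PORT B =====
-- grouped.setdefault(img_name, []).append(text)  IS  Dict.modify with default []
def pvB_groupUpd (features : PySem.Set String) (g : PySem.Dict String (List String))
    (img_name : String) (text : String) : PySem.Dict String (List String) :=
  if PySem.Set.contains features img_name then g.modify img_name [] (fun l => l ++ [text])
  else g

-- grouping loop body: lines without a tab are skipped (len(parts) < 2: continue)
def pvB_groupStep (features : PySem.Set String) (g : PySem.Dict String (List String))
    (line : String) : PySem.Dict String (List String) :=
  match (PySem.Str.split? line "\t").getD [] with
  | p0 :: p1 :: _ => pvB_groupUpd features g (PySem.Str.slice p0 none (some (-2))) p1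
  | _ => g

-- word_counts.setdefault(w, len(word_counts)+1), appending the id to the caption's code
def pvB_wordStep (u : PySem.Dict String Int × List Int) (w : String) :
    PySem.Dict String Int × List Int :=
  match u.1.get? w with
  | some i => (u.1, u.2 ++ [i])
  | none => (u.1.insert w ((u.1.size : Int) + 1), u.2 ++ [((u.1.size : Int) + 1)])

-- one caption: wrap, then encode its words in the same pass
def pvB_capStep (t : PySem.Dict String Int × List (List Int)) (txt : String) :
    PySem.Dict String Int × List (List Int) :=
  let ws := PySem.Str.split₀ (PySem.Str.join "" ["startofseq ", PySem.Str.lower txt, " endofseq"])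
  let c := ws.foldl pvB_wordStep (t.1, [])
  (c.1, t.2 ++ [c.2])

-- one image: encode all its captions, store the list under the image name
def pvB_imgStep (s : PySem.Dict String Int × PySem.Dict String (List (List Int)))
    (p : String × List String) :
    PySem.Dict String Int × PySem.Dict String (List (List Int)) :=
  let r := p.2.foldl pvB_capStep (s.1, [])
  (r.1, s.2.insert p.1 r.2)

def preprocess_captions_alt (captions : List String) (images_features : List String) :
    (List (String × Int)) × (List (String × List (List Int))) :=
  let features := PySem.Set.ofList images_features
  let grouped := captions.foldl (pvB_groupStep features) PySem.Dict.empty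
  let fin := grouped.items.foldl pvB_imgStep (PySem.Dict.empty, PySem.Dict.empty)
  (fin.1.items, fin.2.items)

-- ===== PRECONDITION & SPEC =====
def Spec_preprocess_captions (captions : List String) (images_features : List String) (out : (List (String × Int)) × (List (String × List (List Int)))) : Prop := out = preprocess_captions_alt captions images_features
instance (captions : List String) (images_features : List String) (out : (List (String × Int)) × (List (String × List (List Int)))) : Decidable (Spec_preprocess_captions captions images_features out) := by unfold Spec_preprocess_captions; infer_instance

-- ===== CLAIM (what is proved, stated in full; the proofs are below) =====
def Claim_equal_preprocess_captions : Prop := ∀ (captions : List String) (images_features : List String), Dom_preprocess_captions captions images_features → Spec_preprocess_captions captions images_features (preprocess_captions captions images_features)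

-- ===== LEMMAS AND PROOFS =====

-- words of a wrapped caption
def pvWords (txt : String) : List String := PySem.Str.split₀ (pvA_process txt)

-- vocabulary extension by one word / a word list / a caption list / an items list
def pvExt1 (wc : PySem.Dict String Int) (w : String) : PySem.Dict String Int :=
  match wc.get? w with
  | some _ => wc
  | none => wc.insert w ((wc.size : Int) + 1)

def pvExtL (wc : PySem.Dict String Int) (ws : List String) : PySem.Dict String Int :=
  ws.foldl pvExt1 wc

def pvExtC (wc : PySem.Dict String Int) (txts : List String) : PySem.Dict String Int :=
  txts.foldl (fun wc t => pvExtL wc (pvWords t)) wc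

def pvVOC (l : List (String × List String)) (wc : PySem.Dict String Int) :
    PySem.Dict String Int :=
  l.foldl (fun wc p => pvExtC wc p.2) wc

theorem pvExtL_cons (wc : PySem.Dict String Int) (w : String) (ws : List String) :
    pvExtL wc (w :: ws) = pvExtL (pvExt1 wc w) ws := by
  simp only [pvExtL, List.foldl_cons]

theorem pvExtC_cons (wc : PySem.Dict String Int) (t : String) (txts : List String) :
    pvExtC wc (t :: txts) = pvExtC (pvExtL wc (pvWords t)) txts := by
  simp only [pvExtC, List.foldl_cons]

theorem pvVOC_cons (wc : PySem.Dict String Int) (p : String × List String)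
    (l : List (String × List String)) : pvVOC (p :: l) wc = pvVOC l (pvExtC wc p.2) := by
  simp only [pvVOC, List.foldl_cons]

-- monotonicity: a key once present keeps its value; presence: every word seen is present
theorem pv_get_ext1 {wc : PySem.Dict String Int} {w : String} {v : Int} (x : String)
    (h : wc.get? w = some v) : (pvExt1 wc x).get? w = some v := by
  unfold pvExt1
  split
  · exact h
  · next hx =>
    have hne : w ≠ x := by intro e; subst e; rw [h] at hx; cases hx
    rw [PySem.Dict.get?_insert_of_ne _ _ hne]; exact h

theorem pv_get_extL {w : String} {v : Int} (ws : List String) :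
    ∀ {wc : PySem.Dict String Int}, wc.get? w = some v → (pvExtL wc ws).get? w = some v := by
  induction ws with
  | nil => intro wc h; simpa [pvExtL] using h
  | cons a t ih => intro wc h; rw [pvExtL_cons]; exact ih (pv_get_ext1 a h)

theorem pv_get_extC {w : String} {v : Int} (txts : List String) :
    ∀ {wc : PySem.Dict String Int}, wc.get? w = some v → (pvExtC wc txts).get? w = some v := by
  induction txts with
  | nil => intro wc h; simpa [pvExtC] using h
  | cons a t ih => intro wc h; rw [pvExtC_cons]; exact ih (pv_get_extL _ h)

theorem pv_get_voc {w : String} {v : Int} (l : List (String × List String)) :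
    ∀ {wc : PySem.Dict String Int}, wc.get? w = some v → (pvVOC l wc).get? w = some v := by
  induction l with
  | nil => intro wc h; simpa [pvVOC] using h
  | cons p t ih => intro wc h; rw [pvVOC_cons]; exact ih (pv_get_extC _ h)

theorem pv_present_extL {w : String} (ws : List String) :
    ∀ (wc : PySem.Dict String Int), w ∈ ws → ∃ v, (pvExtL wc ws).get? w = some v := by
  induction ws with
  | nil => intro wc h; cases h
  | cons a t ih =>
    intro wc h
    rw [pvExtL_cons]
    rcases List.mem_cons.mp h with rfl | hm
    · cases hx : wc.get? w with
      | some v =>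
        refine ⟨v, pv_get_extL t ?_⟩
        unfold pvExt1; rw [hx]; exact hx
      | none =>
        refine ⟨(wc.size : Int) + 1, pv_get_extL t ?_⟩
        unfold pvExt1; rw [hx]
        exact PySem.Dict.get?_insert_self _ _ _
    · exact ih _ hm

theorem pv_present_extC {w : String} {t : String} (txts : List String) :
    ∀ (wc : PySem.Dict String Int), t ∈ txts → w ∈ pvWords t →
      ∃ v, (pvExtC wc txts).get? w = some v := by
  induction txts with
  | nil => intro wc h; cases h
  | cons a ts ih =>
    intro wc ht hw
    rw [pvExtC_cons]
    rcases List.mem_cons.mp ht with rfl | hm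
    · obtain ⟨v, hv⟩ := pv_present_extL (pvWords t) wc hw
      exact ⟨v, pv_get_extC ts hv⟩
    · exact ih _ hm hw

-- B's loops: word loop, caption loop, image loop
theorem pv_enc (ws : List String) :
    ∀ (wc : PySem.Dict String Int) (acc : List Int),
      ws.foldl pvB_wordStep (wc, acc)
        = (pvExtL wc ws, acc ++ ws.map (fun w => (pvExtL wc ws).getD w 0)) := by
  induction ws with
  | nil => intro wc acc; simp [pvExtL]
  | cons w t ih =>
    intro wc acc
    simp only [List.foldl_cons, pvExtL_cons, List.map_cons]
    cases hx : wc.get? w with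
    | some i =>
      have h1 : pvB_wordStep (wc, acc) w = (wc, acc ++ [i]) := by
        unfold pvB_wordStep; rw [hx]
      have h2 : pvExt1 wc w = wc := by unfold pvExt1; rw [hx]
      rw [h1, h2, ih]
      have h3 : (pvExtL wc t).getD w 0 = i :=
        PySem.Dict.getD_of_get?_eq_some _ _ (pv_get_extL t hx)
      simp [h3]
    | none =>
      have h1 : pvB_wordStep (wc, acc) w
          = (wc.insert w ((wc.size : Int) + 1), acc ++ [((wc.size : Int) + 1)]) := by
        unfold pvB_wordStep; rw [hx]
      have h2 : pvExt1 wc w = wc.insert w ((wc.size : Int) + 1) := by unfold pvExt1; rw [hx]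
      rw [h1, h2, ih]
      have h3 : (pvExtL (wc.insert w ((wc.size : Int) + 1)) t).getD w 0 = (wc.size : Int) + 1 :=
        PySem.Dict.getD_of_get?_eq_some _ _ (pv_get_extL t (PySem.Dict.get?_insert_self _ _ _))
      simp [h3]

theorem pv_encC (txts : List String) :
    ∀ (wc : PySem.Dict String Int) (acc : List (List Int)),
      txts.foldl pvB_capStep (wc, acc)
        = (pvExtC wc txts,
           acc ++ txts.map (fun t => (pvWords t).map (fun w => (pvExtC wc txts).getD w 0))) := by
  induction txts with
  | nil => intro wc acc; simp [pvExtC]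
  | cons t ts ih =>
    intro wc acc
    simp only [List.foldl_cons, pvExtC_cons, List.map_cons]
    have hcap : pvB_capStep (wc, acc) t
        = (pvExtL wc (pvWords t),
           acc ++ [(pvWords t).map (fun w => (pvExtL wc (pvWords t)).getD w 0)]) := by
      simp only [pvB_capStep]
      rw [show PySem.Str.split₀ (PySem.Str.join "" ["startofseq ", PySem.Str.lower t, " endofseq"])
            = pvWords t from rfl]
      rw [pv_enc]
      simp
    rw [hcap, ih]
    have hhead : (pvWords t).map (fun w => (pvExtL wc (pvWords t)).getD w 0)
        = (pvWords t).map (fun w => (pvExtC (pvExtL wc (pvWords t)) ts).getD w 0) := by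
      refine List.map_congr_left (fun w hw => ?_)
      obtain ⟨v, hv⟩ := pv_present_extL (pvWords t) wc hw
      rw [PySem.Dict.getD_of_get?_eq_some _ _ hv,
          PySem.Dict.getD_of_get?_eq_some _ _ (pv_get_extC ts hv)]
    rw [hhead]
    simp

theorem pv_bfold (l : List (String × List String)) :
    ∀ (wc : PySem.Dict String Int) (dres : PySem.Dict String (List (List Int))),
      l.foldl pvB_imgStep (wc, dres)
        = (pvVOC l wc,
           l.foldl (fun dr p => dr.insert p.1
             (p.2.map (fun t => (pvWords t).map (fun w => (pvVOC l wc).getD w 0)))) dres) := by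
  induction l with
  | nil => intro wc dres; simp [pvVOC]
  | cons p l ih =>
    intro wc dres
    simp only [List.foldl_cons, pvVOC_cons]
    have hstep : pvB_imgStep (wc, dres) p
        = (pvExtC wc p.2, dres.insert p.1
            (p.2.map (fun t => (pvWords t).map (fun w => (pvExtC wc p.2).getD w 0)))) := by
      simp only [pvB_imgStep]
      rw [pv_encC]
      simp
    rw [hstep]
    have henc : p.2.map (fun t => (pvWords t).map (fun w => (pvExtC wc p.2).getD w 0))
        = p.2.map (fun t => (pvWords t).map (fun w => (pvVOC l (pvExtC wc p.2)).getD w 0)) := by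
      refine List.map_congr_left (fun t ht => ?_)
      refine List.map_congr_left (fun w hw => ?_)
      obtain ⟨v, hv⟩ := pv_present_extC p.2 wc ht hw
      rw [PySem.Dict.getD_of_get?_eq_some _ _ hv,
          PySem.Dict.getD_of_get?_eq_some _ _ (pv_get_voc l hv)]
    rw [henc, ih]

-- A's phase-3 loop carries word_index = size + 1
theorem pv_vocab_words (ws : List String) :
    ∀ (wc : PySem.Dict String Int) (n : Int), n = (wc.size : Int) + 1 →
      ws.foldl pvA_vocabStep (wc, n) = (pvExtL wc ws, ((pvExtL wc ws).size : Int) + 1) := by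
  induction ws with
  | nil => intro wc n hn; simp [pvExtL, hn]
  | cons w t ih =>
    intro wc n hn
    simp only [List.foldl_cons, pvExtL_cons]
    by_cases hc : wc.contains w = true
    · have h1 : pvA_vocabStep (wc, n) w = (wc, n) := by
        unfold pvA_vocabStep; simp only [if_pos hc]
      have h2 : pvExt1 wc w = wc := by
        unfold pvExt1
        rw [PySem.Dict.contains_eq_isSome_get?] at hc
        cases hx : wc.get? w with
        | some v => rfl
        | none => rw [hx] at hc; cases hc
      rw [h1, h2]
      exact ih wc n hn
    · have hcf : wc.contains w = false := by simpa using hc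
      have hg : wc.get? w = none := (PySem.Dict.get?_eq_none_iff_contains _ _).mpr hcf
      have h1 : pvA_vocabStep (wc, n) w = (wc.insert w n, n + 1) := by
        unfold pvA_vocabStep; simp only [hc, if_false, Bool.false_eq_true]
      have h2 : pvExt1 wc w = wc.insert w ((wc.size : Int) + 1) := by
        unfold pvExt1; rw [hg]
      rw [h1, h2, hn]
      refine ih _ _ ?_
      simp only [PySem.Dict.size_insert, hcf]
      push_cast
      simp

theorem pv_vocab_caps (txts : List String) :
    ∀ (wc : PySem.Dict String Int) (n : Int), n = (wc.size : Int) + 1 →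
      txts.foldl (fun s t => (pvWords t).foldl pvA_vocabStep s) (wc, n)
        = (pvExtC wc txts, ((pvExtC wc txts).size : Int) + 1) := by
  induction txts with
  | nil => intro wc n hn; simp [pvExtC, hn]
  | cons t ts ih =>
    intro wc n hn
    simp only [List.foldl_cons, pvExtC_cons]
    rw [pv_vocab_words _ _ _ hn]
    exact ih (pvExtL wc (pvWords t)) _ rfl

theorem pv_vocab_items (l : List (String × List String)) :
    ∀ (wc : PySem.Dict String Int) (n : Int), n = (wc.size : Int) + 1 →
      l.foldl (fun s p => p.2.foldl (fun s t => (pvWords t).foldl pvA_vocabStep s) s) (wc, n)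
        = (pvVOC l wc, ((pvVOC l wc).size : Int) + 1) := by
  induction l with
  | nil => intro wc n hn; simp [pvVOC, hn]
  | cons p t ih =>
    intro wc n hn
    simp only [List.foldl_cons, pvVOC_cons]
    rw [pv_vocab_caps _ _ _ hn]
    exact ih (pvExtC wc p.2) _ rfl

-- list surgery and phase 2
theorem pv_set_append {α : Type} (pre : List α) (x y : α) (suf : List α) :
    (pre ++ x :: suf).set pre.length y = pre ++ y :: suf := by
  induction pre with
  | nil => rfl
  | cons a t ih => simp [ih]

theorem pv_idxOf_append (c : String) (done : List (List Int))
    (suf : List (Sum String (List Int))) :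
    List.idxOf? (Sum.inl c) (done.map Sum.inr ++ Sum.inl c :: suf) = some done.length := by
  induction done with
  | nil =>
    simp only [List.map_nil, List.nil_append, List.idxOf?, List.findIdx?_cons]
    rw [show ((Sum.inl c : Sum String (List Int)) == Sum.inl c) = (c == c) from rfl]
    simp
  | cons d t ih =>
    simp only [List.map_cons, List.cons_append, List.idxOf?, List.findIdx?_cons] at ih ⊢
    rw [show ((Sum.inr d : Sum String (List Int)) == Sum.inl c) = false from rfl]
    simp only [Bool.false_eq_true, if_false, ih]
    rfl

theorem pv_enumset (f : String → String) (xs : List String) :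
    ∀ (pre : List String),
      (PySem.List.enumerate xs (pre.length : Int)).foldl
          (fun l ic => l.set ic.1.toNat (f ic.2)) (pre ++ xs) = pre ++ xs.map f := by
  induction xs with
  | nil => intro pre; simp [PySem.List.enumerate]
  | cons x t ih =>
    intro pre
    rw [show PySem.List.enumerate (x :: t) (pre.length : Int)
          = ((pre.length : Int), x) :: PySem.List.enumerate t ((pre.length : Int) + 1) from rfl]
    rw [List.foldl_cons]
    have h1 : (pre ++ x :: t).set ((pre.length : Int)).toNat (f x) = (pre ++ [f x]) ++ t := by
      simp only [Int.toNat_natCast]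
      rw [pv_set_append]
      simp
    rw [h1]
    have h2 : ((pre.length : Int) + 1) = (((pre ++ [f x]).length : Nat) : Int) := by
      simp
    rw [h2, ih (pre ++ [f x])]
    simp

theorem pv_insert_self_eq (d : PySem.Dict String (List String)) (k : String)
    (v : List String) (h : d.get? k = some v) (hnd : d.keys.Nodup) : d.insert k v = d := by
  apply PySem.Dict.ext
  have hc : d.contains k = true := by
    rw [PySem.Dict.contains_eq_isSome_get?, h]; rfl
  rw [PySem.Dict.items_insert_of_contains _ _ hc]
  have : ∀ q ∈ d.items, (fun p => if (p.1 == k) = true then (k, v) else p) q = id q := by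
    intro q hq
    by_cases hqk : (q.1 == k) = true
    · have hk : q.1 = k := by exact eq_of_beq hqk
      have := PySem.Dict.get?_of_mem_items d hq hnd
      rw [hk, h] at this
      simp only [hqk, if_pos]
      cases q with
      | mk q1 q2 =>
        simp only [id]
        obtain rfl : q2 = v := by injection this with hh; exact hh.symm
        simp only [] at hk
        rw [hk]
    · simp [hqk]
  rw [List.map_congr_left this, List.map_id]

theorem pv_modify_chain {β : Type} (g : β → List String → List String) (k : String)
    (l : List β) :
    ∀ (d : PySem.Dict String (List String)) (v0 : List String),
      l.foldl (fun d b => d.modify k [] (fun v => g b v)) (d.insert k v0)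
        = d.insert k (l.foldl (fun v b => g b v) v0) := by
  induction l with
  | nil => intro d v0; simp
  | cons b t ih =>
    intro d v0
    simp only [List.foldl_cons]
    have h1 : (d.insert k v0).modify k [] (fun v => g b v) = d.insert k (g b v0) := by
      simp [PySem.Dict.modify, PySem.Dict.getD_insert_self, PySem.Dict.insert_insert_self]
    rw [h1, ih]

theorem pv_phase2_inner (d : PySem.Dict String (List String)) (p : String × List String)
    (h : d.get? p.1 = some p.2) (hnd : d.keys.Nodup) :
    (PySem.List.enumerate p.2).foldl (fun d ic =>
        d.modify p.1 [] (fun l => l.set ic.1.toNat (pvA_process ic.2))) d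
      = d.insert p.1 (p.2.map pvA_process) := by
  obtain ⟨k, txts⟩ := p
  simp only [] at h ⊢
  cases txts with
  | nil =>
    rw [show PySem.List.enumerate ([] : List String) 0 = [] from rfl]
    rw [List.foldl_nil, List.map_nil]
    exact (pv_insert_self_eq d k [] h hnd).symm
  | cons c cs =>
    rw [show PySem.List.enumerate (c :: cs) 0 = ((0 : Int), c) :: PySem.List.enumerate cs 1 from rfl]
    rw [List.foldl_cons]
    have h1 : d.modify k [] (fun l => l.set ((0 : Int)).toNat (pvA_process c))
        = d.insert k (pvA_process c :: cs) := by
      simp only [PySem.Dict.modify]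
      rw [PySem.Dict.getD_of_get?_eq_some _ _ h]
      rfl
    rw [h1]
    rw [pv_modify_chain (fun (ic : Int × String) (v : List String) =>
          v.set ic.1.toNat (pvA_process ic.2)) k (PySem.List.enumerate cs 1) d
          (pvA_process c :: cs)]
    congr 1
    have h2 : (1 : Int) = (([pvA_process c].length : Nat) : Int) := by simp
    have h3 : pvA_process c :: cs = [pvA_process c] ++ cs := rfl
    rw [h3, h2, pv_enumset pvA_process cs [pvA_process c]]
    simp

theorem pv_phase2_outer (l2 : List (String × List String)) :
    ∀ (l1 : List (String × List String)) (d : PySem.Dict String (List String)),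
      d.items = l1 ++ l2 → d.keys.Nodup →
      (l2.foldl (fun d p => (PySem.List.enumerate p.2).foldl (fun d ic =>
          d.modify p.1 [] (fun l => l.set ic.1.toNat (pvA_process ic.2))) d) d).items
        = l1 ++ l2.map (fun p => (p.1, p.2.map pvA_process)) := by
  induction l2 with
  | nil => intro l1 d hitems hnd; simpa using hitems
  | cons p t ih =>
    intro l1 d hitems hnd
    simp only [List.foldl_cons]
    have hpmem : p ∈ d.items := by rw [hitems]; simp
    have hget : d.get? p.1 = some p.2 := PySem.Dict.get?_of_mem_items d hpmem hnd
    rw [pv_phase2_inner d p hget hnd]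
    have hc : d.contains p.1 = true := by
      rw [PySem.Dict.contains_eq_isSome_get?, hget]; rfl
    have hkeys : d.keys = (l1 ++ p :: t).map (fun q => q.1) := by
      rw [← hitems]; rfl
    have hnd2 : ((l1 ++ p :: t).map (fun q => q.1)).Nodup := by rw [← hkeys]; exact hnd
    rw [List.map_append, List.map_cons] at hnd2
    have hdisj := (List.nodup_append.mp hnd2).2.2
    have hpt : p.1 ∉ t.map (fun q => q.1) :=
      (List.nodup_cons.mp (List.nodup_append.mp hnd2).2.1).1
    have hl1 : ∀ q ∈ l1, (q.1 == p.1) = false := by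
      intro q hq
      have h1 : q.1 ∈ l1.map (fun q => q.1) := List.mem_map_of_mem hq
      have hne : q.1 ≠ p.1 := hdisj q.1 h1 p.1 (by simp)
      simpa using hne
    have hlt : ∀ q ∈ t, (q.1 == p.1) = false := by
      intro q hq
      have hne : q.1 ≠ p.1 := fun e => hpt (e ▸ List.mem_map_of_mem hq)
      simpa using hne
    have hitems' : (d.insert p.1 (p.2.map pvA_process)).items
        = (l1 ++ [(p.1, p.2.map pvA_process)]) ++ t := by
      rw [PySem.Dict.items_insert_of_contains _ _ hc, hitems]
      rw [List.map_append, List.map_cons]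
      have e1 : l1.map (fun q => if (q.1 == p.1) = true then (p.1, p.2.map pvA_process) else q)
          = l1 := by
        conv_rhs => rw [← List.map_id l1]
        exact List.map_congr_left (fun q hq => by simp [hl1 q hq])
      have e2 : t.map (fun q => if (q.1 == p.1) = true then (p.1, p.2.map pvA_process) else q)
          = t := by
        conv_rhs => rw [← List.map_id t]
        exact List.map_congr_left (fun q hq => by simp [hlt q hq])
      rw [e1, e2]
      simp
    have hnd' : (d.insert p.1 (p.2.map pvA_process)).keys.Nodup := by
      rw [PySem.Dict.keys_insert_of_contains _ _ hc]; exact hnd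
    have := ih (l1 ++ [(p.1, p.2.map pvA_process)]) (d.insert p.1 (p.2.map pvA_process))
      hitems' hnd'
    rw [this]
    simp

-- phase 4 encodes the remaining strings in order
theorem pv_p4 (wc : PySem.Dict String Int) (todo : List String) :
    ∀ (fuel : Nat), todo.length ≤ fuel → ∀ (done : List (List Int)),
      pvA_phase4 wc fuel done.length (done.map Sum.inr ++ todo.map Sum.inl)
        = (done ++ todo.map (fun c =>
            (PySem.Str.split₀ c).map (fun w => wc.getD w 0))).map Sum.inr := by
  induction todo with
  | nil =>
    intro fuel _ done
    cases fuel with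
    | zero => simp [pvA_phase4]
    | succ f =>
      rw [pvA_phase4]
      have hg : PySem.List.pyGet? (done.map Sum.inr ++ ([] : List String).map Sum.inl)
          ((done.length : Nat) : Int) = (none : Option (Sum String (List Int))) := by
        rw [PySem.List.pyGet?_natCast]
        simp
      rw [hg]
      simp
  | cons c t ih =>
    intro fuel hf done
    cases fuel with
    | zero => simp at hf
    | succ f =>
      rw [pvA_phase4]
      have hg : PySem.List.pyGet? (done.map Sum.inr ++ (c :: t).map Sum.inl)
          ((done.length : Nat) : Int) = some (Sum.inl c) := by
        rw [PySem.List.pyGet?_natCast]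
        rw [List.getElem?_append_right (by simp)]
        simp
      have hidx : PySem.List.index? (done.map Sum.inr ++ (c :: t).map Sum.inl)
          (Sum.inl c) = some done.length := by
        rw [PySem.List.index?]
        rw [List.map_cons]
        exact pv_idxOf_append c done (t.map Sum.inl)
      rw [hg]
      simp only [hidx]
      have hset : (done.map Sum.inr ++ (c :: t).map Sum.inl).set done.length
            (Sum.inr ((PySem.Str.split₀ c).map (fun w => wc.getD w 0)))
          = ((done ++ [(PySem.Str.split₀ c).map (fun w => wc.getD w 0)]).map Sum.inr)
            ++ t.map Sum.inl := by
        rw [List.map_cons]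
        rw [show done.length = (done.map (Sum.inr : List Int → Sum String (List Int))).length by simp]
        rw [pv_set_append]
        simp
      rw [hset]
      have hlen : done.length + 1
          = (done ++ [(PySem.Str.split₀ c).map (fun w => wc.getD w 0)]).length := by simp
      rw [hlen, ih f (by simpa using hf)]
      simp

-- phase-1 dict update: `if img_name not in captions_dict: … else append`

-- phase 1 of A = grouping pass of B; its keys are nodup
theorem pv_upd_eq (images_features : List String) (d : PySem.Dict String (List String))
    (img_name text : String) :
    pvA_phase1Upd images_features d img_name text
      = pvB_groupUpd (PySem.Set.ofList images_features) d img_name text := by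
  unfold pvA_phase1Upd pvB_groupUpd
  have hmem : PySem.Set.contains (PySem.Set.ofList images_features) img_name
      = images_features.contains img_name := by
    rw [PySem.Set.contains, List.contains_eq_mem, List.contains_eq_mem]
    simp [PySem.Set.mem_ofList]
  rw [hmem]
  by_cases hin : images_features.contains img_name = true
  · rw [if_pos hin, if_pos hin]
    by_cases hc : d.contains img_name = true
    · rw [hc]; rfl
    · have hcf : d.contains img_name = false := by simpa using hc
      rw [hcf]
      simp only [Bool.not_false, if_pos]
      simp only [PySem.Dict.modify]
      rw [PySem.Dict.getD_of_not_contains _ _ hcf]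
      rfl
  · rw [if_neg hin, if_neg hin]

theorem pv_phase1_eq (images_features : List String) :
    pvA_phase1Step images_features = pvB_groupStep (PySem.Set.ofList images_features) := by
  funext d caption
  unfold pvA_phase1Step pvB_groupStep
  cases hp : (PySem.Str.split? caption "\t").getD [] with
  | nil => rfl
  | cons p0 rest =>
    cases rest with
    | nil => rfl
    | cons p1 r2 =>
      have h1 : PySem.List.pyGet? (p0 :: p1 :: r2) 1 = some p1 := by
        rw [show ((1 : Int)) = ((1 : Nat) : Int) from rfl, PySem.List.pyGet?_natCast]
        rfl
      have h0 : PySem.List.pyGet? (p0 :: p1 :: r2) 0 = some p0 := by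
        rw [show ((0 : Int)) = ((0 : Nat) : Int) from rfl, PySem.List.pyGet?_natCast]
        rfl
      simp only [h1, h0, Option.getD_some]
      exact pv_upd_eq images_features d _ _

theorem pv_foldl_pres {α β : Type} (f : α → β → α) (P : α → Prop)
    (hf : ∀ a b, P a → P (f a b)) : ∀ (l : List β) (a : α), P a → P (l.foldl f a) := by
  intro l
  induction l with
  | nil => intro a h; exact h
  | cons b t ih => intro a h; exact ih _ (hf a b h)

theorem pv_group_nodup (captions images_features : List String) :
    (captions.foldl (pvA_phase1Step images_features) PySem.Dict.empty).keys.Nodup := by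
  refine pv_foldl_pres (pvA_phase1Step images_features)
      (fun d => d.keys.Nodup) ?_ captions PySem.Dict.empty ?_
  · intro d caption h
    unfold pvA_phase1Step
    split
    · exact h
    · unfold pvA_phase1Upd
      split_ifs with h1 h2
      · exact PySem.Dict.nodup_keys_insert _ _ _ h
      · rw [PySem.Dict.keys_modify]
        exact PySem.Dict.nodup_keys_insert _ _ _ h
      · exact h
  · simpa [PySem.Dict.keys] using PySem.Dict.nodup_keys_empty (κ := String) (ν := List String)

-- phase-4 at the top level: encode every caption of one image
theorem pv_p4_top (wc : PySem.Dict String Int) (caps : List String) :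
    pvA_phase4 wc (caps.map (Sum.inl : String → Sum String (List Int))).length 0
        (caps.map Sum.inl)
      = (caps.map (fun c => (PySem.Str.split₀ c).map (fun w => wc.getD w 0))).map Sum.inr := by
  simpa using pv_p4 wc caps (caps.map (Sum.inl : String → Sum String (List Int))).length
    (by simp) []

theorem pv_p4_val (wc : PySem.Dict String Int) (caps : List String) :
    ((pvA_phase4 wc (caps.map (Sum.inl : String → Sum String (List Int))).length 0
        (caps.map Sum.inl)).map (Sum.elim (fun _ => ([] : List Int)) id))
      = caps.map (fun c => (PySem.Str.split₀ c).map (fun w => wc.getD w 0)) := by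
  rw [pv_p4_top]
  simp [List.map_map, Function.comp_def]

-- ===== VERDICT (by name: the statement is the Claim_ definition above) =====
theorem preprocess_captions_spec : Claim_equal_preprocess_captions := by
  unfold Claim_equal_preprocess_captions Spec_preprocess_captions
  intro captions images_features _hdom
  simp only [preprocess_captions, preprocess_captions_alt]
  rw [pv_phase1_eq]
  set G := captions.foldl (pvB_groupStep (PySem.Set.ofList images_features)) PySem.Dict.empty
    with hG
  have hnd : G.keys.Nodup := by
    rw [hG, ← pv_phase1_eq]
    exact pv_group_nodup captions images_features
  have h2 : (G.items.foldl (fun d p =>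
      (PySem.List.enumerate p.2).foldl (fun d ic =>
        d.modify p.1 [] (fun l => l.set ic.1.toNat (pvA_process ic.2))) d) G).items
      = G.items.map (fun p => (p.1, p.2.map pvA_process)) := by
    simpa using pv_phase2_outer G.items [] G rfl hnd
  rw [h2]
  simp only [List.foldl_map]
  simp only [show ∀ t, PySem.Str.split₀ (pvA_process t) = pvWords t from fun _ => rfl]
  rw [pv_vocab_items G.items PySem.Dict.empty 1 (by simp [PySem.Dict.size_empty])]
  rw [pv_bfold G.items PySem.Dict.empty PySem.Dict.empty]
  simp only [pv_p4_val]
  simp only [List.map_map, Function.comp_def]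
  simp only [show ∀ t, PySem.Str.split₀ (pvA_process t) = pvWords t from fun _ => rfl]
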